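-- pv_equiv track=rewrite | github.com/peterpeeterspeter/workspace | research/bathroom-products/convert-to-csv-v5.py | map_category_from_filename
-- ===== SOURCE A (Python) =====
-- CATEGORY_PRIORITY = {
--     # Highest priority: Granular bathtubs
--     'baden-inbouw': 100,
--     'bathtubs-inbouw': 100,
--     'baden-hoek': 100,
--     'bathtubs-hoek': 100,
--     'baden-vrijstaande': 100,
--     'bathtubs-vrijstaande': 100,
--     'bathtubs-half-vrijstaande': 95,  # Map to vrijstaande
--     'bathtubs-whirlpool': 90,  # Map to baden-alle
--
--     # Broad categories (lower priority)
--     'baden-alle': 50,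
--     'bathtubs-alle': 50,
--     'baden': 50,
--     'bathtubs': 50,
--     'toiletten-alle': 50,
--     'toiletten': 50,
--     'douche-alle': 50,
--     'douche': 50,
--     'wastafels-alle': 50,
--     'wastafels': 50,
--     'kranen-alle': 50,
--     'kranen': 50,
--     'spiegels-alle': 50,
--     'spiegels': 50,
--     'tegels-alle': 50,
--     'tegels': 50,
-- }
--
-- def map_category_from_filename(filename: str) -> tuple[str, int]:
--     """Map JSON filename to (category, priority)"""
--     filename_lower = filename.lower()
--
--     # Check all patterns, return highest priority match
--     best_match = ('other', 0)
--
--     for pattern, priority in CATEGORY_PRIORITY.items():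
--         if pattern in filename_lower:
--             if priority > best_match[1]:
--                 best_match = (pattern, priority)
--
--     return best_match
-- ===== SOURCE B (Python) =====
-- # Patterns grouped into tiers by priority, listed in descending priority;
-- # within a tier the original dict order is kept (same tie-break as A).
-- PRIORITY_TIERS = [
--     (100, ['baden-inbouw', 'bathtubs-inbouw', 'baden-hoek', 'bathtubs-hoek',
--            'baden-vrijstaande', 'bathtubs-vrijstaande']),
--     (95, ['bathtubs-half-vrijstaande']),
--     (90, ['bathtubs-whirlpool']),
--     (50, ['baden-alle', 'bathtubs-alle', 'baden', 'bathtubs',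
--           'toiletten-alle', 'toiletten', 'douche-alle', 'douche',
--           'wastafels-alle', 'wastafels', 'kranen-alle', 'kranen',
--           'spiegels-alle', 'spiegels', 'tegels-alle', 'tegels']),
-- ]
--
-- def map_category_from_filename(filename: str) -> tuple[str, int]:
--     """Map JSON filename to (category, priority)"""
--     filename_lower = filename.lower()
--     for priority, patterns in PRIORITY_TIERS:
--         for pattern in patterns:
--             if pattern in filename_lower:
--                 return (pattern, priority)
--     return ('other', 0)
-- ===== Notes on version B (the rewrite author's own statement) =====
-- stated objective: alternative
-- what changed: Replaces the accumulate-the-maximum scan over the flat pattern dict with a grouped-by-priority tier table scanned in descending priority order with an early return at the first matching pattern.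
import Mathlib
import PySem

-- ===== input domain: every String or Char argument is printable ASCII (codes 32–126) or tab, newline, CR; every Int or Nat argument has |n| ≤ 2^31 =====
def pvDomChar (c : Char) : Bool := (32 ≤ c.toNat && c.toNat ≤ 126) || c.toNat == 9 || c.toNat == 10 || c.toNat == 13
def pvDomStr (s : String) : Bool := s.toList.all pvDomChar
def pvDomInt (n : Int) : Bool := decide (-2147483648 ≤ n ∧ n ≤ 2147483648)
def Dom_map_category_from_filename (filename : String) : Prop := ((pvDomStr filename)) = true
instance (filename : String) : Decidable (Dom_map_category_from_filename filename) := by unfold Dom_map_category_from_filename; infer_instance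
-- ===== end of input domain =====

-- B replaces A's accumulate-the-maximum scan over the flat dict with a tier table
-- grouped by priority, scanned in descending priority with an early return; objective: alternative.


-- ===== PORT A =====
def CATEGORY_PRIORITY : List (String × Int) :=
  [("baden-inbouw", 100), ("bathtubs-inbouw", 100), ("baden-hoek", 100),
   ("bathtubs-hoek", 100), ("baden-vrijstaande", 100), ("bathtubs-vrijstaande", 100),
   ("bathtubs-half-vrijstaande", 95), ("bathtubs-whirlpool", 90),
   ("baden-alle", 50), ("bathtubs-alle", 50), ("baden", 50), ("bathtubs", 50),
   ("toiletten-alle", 50), ("toiletten", 50), ("douche-alle", 50), ("douche", 50),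
   ("wastafels-alle", 50), ("wastafels", 50), ("kranen-alle", 50), ("kranen", 50),
   ("spiegels-alle", 50), ("spiegels", 50), ("tegels-alle", 50), ("tegels", 50)]

def map_category_from_filename (filename : String) : String × Int :=
  let filename_lower := PySem.Str.lower filename
  CATEGORY_PRIORITY.foldl
    (fun best_match kv =>
      if PySem.Str.isIn kv.1 filename_lower then
        if kv.2 > best_match.2 then kv else best_match
      else best_match)
    ("other", 0)

-- ===== PORT B =====
def PRIORITY_TIERS : List (Int × List String) :=
  [(100, ["baden-inbouw", "bathtubs-inbouw", "baden-hoek", "bathtubs-hoek",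
          "baden-vrijstaande", "bathtubs-vrijstaande"]),
   (95, ["bathtubs-half-vrijstaande"]),
   (90, ["bathtubs-whirlpool"]),
   (50, ["baden-alle", "bathtubs-alle", "baden", "bathtubs",
         "toiletten-alle", "toiletten", "douche-alle", "douche",
         "wastafels-alle", "wastafels", "kranen-alle", "kranen",
         "spiegels-alle", "spiegels", "tegels-alle", "tegels"])]

-- the two nested early-returning loops: first tier containing a matching pattern wins
def map_category_from_filename_alt (filename : String) : String × Int :=
  let filename_lower := PySem.Str.lower filename
  match PRIORITY_TIERS.findSome?
      (fun tier => (tier.2.find? (fun pat => PySem.Str.isIn pat filename_lower)).map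
        (fun pat => (pat, tier.1))) with
  | some r => r
  | none => ("other", 0)

-- ===== PRECONDITION & SPEC =====
def Spec_map_category_from_filename (filename : String) (out : String × Int) : Prop := out = map_category_from_filename_alt filename
instance (filename : String) (out : String × Int) : Decidable (Spec_map_category_from_filename filename out) := by unfold Spec_map_category_from_filename; infer_instance

-- ===== CLAIM (what is proved, stated in full; the proofs are below) =====
def Claim_equal_map_category_from_filename : Prop := ∀ (filename : String), Dom_map_category_from_filename filename → Spec_map_category_from_filename filename (map_category_from_filename filename)

-- ===== LEMMAS AND PROOFS =====

-- Flattening the tier table (pairing each pattern with its tier priority) gives A's dict.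
theorem tiers_flatten :
    PRIORITY_TIERS.flatMap (fun t => t.2.map (fun p => (p, t.1))) = CATEGORY_PRIORITY := by
  decide

-- The nested first-match scan over tiers equals first-match over the flattened list.
theorem findSome_tiers_eq_find_flat (f : String → Bool) (ts : List (Int × List String)) :
    ts.findSome? (fun t => (t.2.find? f).map (fun p => (p, t.1)))
      = (ts.flatMap (fun t => t.2.map (fun p => (p, t.1)))).find? (fun kv => f kv.1) := by
  induction ts with
  | nil => rfl
  | cons hd tl ih =>
      simp only [List.findSome?_cons, List.flatMap_cons, List.find?_append, List.find?_map]
      cases hfind : hd.2.find? f with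
      | none =>
          have : hd.2.find? ((fun kv : String × Int => f kv.1) ∘ fun p => (p, hd.1)) = none := by
            simpa [Function.comp] using hfind
          simp [this, ih]
      | some p =>
          have : hd.2.find? ((fun kv : String × Int => f kv.1) ∘ fun p => (p, hd.1)) = some p := by
            simpa [Function.comp] using hfind
          simp [this]

-- If every later priority is ≤ the current best's, the fold never replaces the best.
theorem foldl_no_improve (p : String × Int → Bool) (l : List (String × Int)) (b : String × Int)
    (h : ∀ kv ∈ l, kv.2 ≤ b.2) :
    l.foldl (fun best kv => if p kv then (if kv.2 > best.2 then kv else best) else best) b = b := by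
  induction l with
  | nil => rfl
  | cons hd tl ih =>
      have hhd : hd.2 ≤ b.2 := h hd (List.mem_cons_self)
      simp only [List.foldl_cons]
      have : (if p hd then (if hd.2 > b.2 then hd else b) else b) = b := by
        split_ifs with h1 h2
        · omega
        · rfl
        · rfl
      rw [this]
      exact ih (fun kv hkv => h kv (List.mem_cons_of_mem _ hkv))

-- On a priority-descending list of positive priorities, the max fold from ("other", 0)
-- returns the first matching element (or the default).
theorem foldl_eq_find (p : String × Int → Bool) (l : List (String × Int))
    (hdesc : l.Pairwise (fun a b => b.2 ≤ a.2)) (hpos : ∀ kv ∈ l, 0 < kv.2) :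
    l.foldl (fun best kv => if p kv then (if kv.2 > best.2 then kv else best) else best) ("other", 0)
      = ((l.find? p).getD ("other", 0)) := by
  induction l with
  | nil => rfl
  | cons hd tl ih =>
      simp only [List.foldl_cons, List.find?_cons]
      rcases List.pairwise_cons.mp hdesc with ⟨hle, htl⟩
      by_cases hp : p hd
      · simp only [hp, if_pos]
        have hhd : hd.2 > (("other", 0) : String × Int).2 := hpos hd (List.mem_cons_self)
        rw [if_pos hhd]
        rw [foldl_no_improve p tl hd hle]
        simp only [Option.getD_some]
      · simp only [hp, if_neg, Bool.false_eq_true, not_false_iff]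
        exact ih htl (fun kv hkv => hpos kv (List.mem_cons_of_mem _ hkv))

-- ===== VERDICT (by name: the statement is the Claim_ definition above) =====
theorem main_eq_core (fl : String) :
    CATEGORY_PRIORITY.foldl
      (fun best_match kv =>
        if PySem.Str.isIn kv.1 fl then
          if kv.2 > best_match.2 then kv else best_match
        else best_match)
      ("other", 0)
      = (match PRIORITY_TIERS.findSome?
          (fun tier => (tier.2.find? (fun pat => PySem.Str.isIn pat fl)).map
            (fun pat => (pat, tier.1))) with
        | some r => r
        | none => ("other", 0)) := by
  rw [findSome_tiers_eq_find_flat, tiers_flatten]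
  rw [foldl_eq_find _ CATEGORY_PRIORITY (by decide) (by decide)]
  cases h : CATEGORY_PRIORITY.find? (fun kv => PySem.Str.isIn kv.1 fl) <;> simp

theorem map_category_from_filename_spec : Claim_equal_map_category_from_filename := by
  intro filename _
  unfold Spec_map_category_from_filename map_category_from_filename map_category_from_filename_alt
  exact main_eq_core (PySem.Str.lower filename)
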